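-- pv_equiv track=rewrite | github.com/ARM-software/libGPUCounters | specification/lgcpy/xmlutils.py | _to_pretty_xml__space_blocks
-- ===== SOURCE A (Python) =====
-- def _to_pretty_xml__space_blocks(paras: list[str], indent: int) -> list[str]:
--     '''
--     Form a list of text-wrapped blocks we can emit in a markdown-like syntax.
--
--     Input data is a list of lines where lines that do not start with '*' are
--     normal paragraphs, and lines that start with '*' are bullet list items,
--     any of which may be pre-indented by 'indent' spaces.
--
--     Args:
--         data: List of paragraphs or bullet items.
--         indent: Number of spaces to indent by to support emitting into
--             nicely nested pretty-printed XML files.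
--
--     Returns:
--         A list of word-wrapped lines that can be emitted as elements in a
--         pretty-printed markdown document, with blank lines emitted between
--         elements so that markdown would parse things as paragraphs and lists.
--     '''
--     bullet_indent = (' ' * indent) + '*'
--     was_in_list = False
--
--     new_paras = []
--     for i, para in enumerate(paras):
--         # Add newlines before the current element where needed
--         in_list_now = para.startswith(bullet_indent)
--         end_of_list = was_in_list and not in_list_now
--         if (i != 0) and ((not was_in_list) or end_of_list):
--             new_paras.append('')
--
--         new_paras.append(para)
--         was_in_list = in_list_now
--
--     return new_paras
-- ===== SOURCE B (Python) =====
-- def _to_pretty_xml__space_blocks(paras: list[str], indent: int) -> list[str]: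
--     '''Segment the lines into blocks (a maximal run of bullet lines is one
--     block, every other line is a singleton block), then join the blocks with
--     one blank line between consecutive blocks.'''
--     prefix = (' ' * indent) + '*'
--
--     blocks = []
--     run = []  # current run of consecutive bullet lines
--     for para in paras:
--         if para.startswith(prefix):
--             run.append(para)
--         else:
--             if run:
--                 blocks.append(run)
--                 run = []
--             blocks.append([para])
--     if run:
--         blocks.append(run)
--
--     out = []
--     for k, block in enumerate(blocks):
--         if k != 0:
--             out.append('')
--         out.extend(block)
--     return out
-- ===== Notes on version B (the rewrite author's own statement) =====
-- stated objective: alternative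
-- what changed: Replaces the stateful was_in_list/index single pass with an explicit segmentation into blocks (maximal bullet runs, singleton non-bullets) followed by joining the blocks with blank separators.
import Mathlib
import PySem

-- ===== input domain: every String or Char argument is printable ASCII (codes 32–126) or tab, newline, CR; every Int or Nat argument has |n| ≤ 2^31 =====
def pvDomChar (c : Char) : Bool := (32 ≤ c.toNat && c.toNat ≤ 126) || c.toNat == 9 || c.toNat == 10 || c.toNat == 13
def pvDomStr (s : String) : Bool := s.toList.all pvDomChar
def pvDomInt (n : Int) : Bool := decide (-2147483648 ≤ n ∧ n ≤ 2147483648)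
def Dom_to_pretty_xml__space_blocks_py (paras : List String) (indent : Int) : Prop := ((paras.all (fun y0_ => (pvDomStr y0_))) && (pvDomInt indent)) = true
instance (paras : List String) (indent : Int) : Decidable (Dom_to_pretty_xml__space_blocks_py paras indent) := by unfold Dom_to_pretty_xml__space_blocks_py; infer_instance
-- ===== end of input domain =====

-- B segments the lines into blocks (maximal bullet runs / singleton non-bullets) and joins
-- them with blank separators, replacing A's stateful was_in_list single pass (objective: alternative).

-- ===== PORT A =====
-- loop body of A's 'for i, para in enumerate(paras)': state = (new_paras, was_in_list)
def pvStepA (bp : String) (st : List String × Bool) (ip : Int × String) : List String × Bool :=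
  let i := ip.1
  let para := ip.2
  let new_paras := st.1
  let was_in_list := st.2
  let in_list_now := PySem.Str.startswith para bp
  let end_of_list := was_in_list && !in_list_now
  let new_paras := if i ≠ 0 ∧ (!was_in_list || end_of_list) = true then new_paras ++ [""] else new_paras
  (new_paras ++ [para], in_list_now)

def to_pretty_xml__space_blocks_py (paras : List String) (indent : Int) : List String :=
  let bullet_indent := String.mk (PySem.List.pyRepeat [' '] indent ++ ['*'])
  ((PySem.List.enumerate paras 0).foldl (pvStepA bullet_indent) ([], false)).1

-- ===== PORT B =====
-- loop body of B's segmentation pass: state = (blocks, run)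
def pvStepB (bp : String) (st : List (List String) × List String) (para : String) :
    List (List String) × List String :=
  let blocks := st.1
  let run := st.2
  if PySem.Str.startswith para bp then (blocks, run ++ [para])
  else if run ≠ [] then (blocks ++ [run] ++ [[para]], [])
  else (blocks ++ [[para]], [])

-- B's trailing 'if run: blocks.append(run)'
def pvFlush (st : List (List String) × List String) : List (List String) :=
  if st.2 ≠ [] then st.1 ++ [st.2] else st.1

-- loop body of B's 'for k, block in enumerate(blocks)'
def pvJoinStep (out : List String) (kb : Int × List String) : List String :=
  let out := if kb.1 ≠ 0 then out ++ [""] else out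
  out ++ kb.2

def to_pretty_xml__space_blocks_py_alt (paras : List String) (indent : Int) : List String :=
  let pref := String.mk (PySem.List.pyRepeat [' '] indent ++ ['*'])
  let blocks := pvFlush (paras.foldl (pvStepB pref) ([], []))
  (PySem.List.enumerate blocks 0).foldl pvJoinStep []

-- ===== PRECONDITION & SPEC =====
def Spec_to_pretty_xml__space_blocks_py (paras : List String) (indent : Int) (out : List String) : Prop := out = to_pretty_xml__space_blocks_py_alt paras indent
instance (paras : List String) (indent : Int) (out : List String) : Decidable (Spec_to_pretty_xml__space_blocks_py paras indent out) := by unfold Spec_to_pretty_xml__space_blocks_py; infer_instance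

-- ===== CLAIM (what is proved, stated in full; the proofs are below) =====
def Claim_equal_to_pretty_xml__space_blocks_py : Prop := ∀ (paras : List String) (indent : Int), Dom_to_pretty_xml__space_blocks_py paras indent → Spec_to_pretty_xml__space_blocks_py paras indent (to_pretty_xml__space_blocks_py paras indent)

-- ===== LEMMAS AND PROOFS =====

-- common recursive characterisation: lines after the first, given "previous line was a bullet"
def pvCore (bp : String) : Bool → List String → List String
  | _, [] => []
  | w, p :: ps =>
      (if PySem.Str.startswith p bp && w then [p] else ["", p]) ++
        pvCore bp (PySem.Str.startswith p bp) ps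

-- simple join of blocks with blank separators
def pvJoinS : List (List String) → List String
  | [] => []
  | b :: bs => b ++ bs.flatMap (fun blk => "" :: blk)

lemma pvA_loop (bp : String) (ps : List String) :
    ∀ (i : Int) (acc : List String) (w : Bool), 1 ≤ i →
      ((PySem.List.enumerate ps i).foldl (pvStepA bp) (acc, w)).1 = acc ++ pvCore bp w ps := by
  induction ps with
  | nil => intro i acc w _; simp [PySem.List.enumerate, pvCore]
  | cons p ps ih =>
      intro i acc w hi
      rw [PySem.List.enumerate_cons]
      simp only [List.foldl_cons]
      have hi0 : i ≠ 0 := by omega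
      rw [ih (i + 1) _ _ (by omega)]
      cases w <;> cases hb : PySem.Chars.startswith p.toList bp.toList <;>
        simp [pvStepA, pvCore, hb, hi0]

lemma pvJoin_loop (bs : List (List String)) :
    ∀ (k : Int) (acc : List String), 1 ≤ k →
      (PySem.List.enumerate bs k).foldl pvJoinStep acc =
        acc ++ bs.flatMap (fun blk => "" :: blk) := by
  induction bs with
  | nil => intro k acc _; simp [PySem.List.enumerate]
  | cons b bs ih =>
      intro k acc hk
      rw [PySem.List.enumerate_cons]
      simp only [List.foldl_cons]
      have hk0 : k ≠ 0 := by omega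
      rw [ih (k + 1) _ (by omega)]
      simp [pvJoinStep, hk0]

lemma pvJoin_top (bs : List (List String)) :
    (PySem.List.enumerate bs 0).foldl pvJoinStep [] = pvJoinS bs := by
  cases bs with
  | nil => simp [PySem.List.enumerate, pvJoinS]
  | cons b bs =>
      rw [PySem.List.enumerate_cons]
      simp only [List.foldl_cons]
      rw [pvJoin_loop bs (0 + 1) _ (by omega)]
      simp [pvJoinStep, pvJoinS]

lemma pvJoinS_last (bs : List (List String)) (r : List String) (p : String) :
    pvJoinS (bs ++ [r ++ [p]]) = pvJoinS (bs ++ [r]) ++ [p] := by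
  cases bs with
  | nil => simp [pvJoinS]
  | cons b bs => simp [pvJoinS]

lemma pvJoinS_block (bs : List (List String)) (blk : List String) (h : bs ≠ []) :
    pvJoinS (bs ++ [blk]) = pvJoinS bs ++ "" :: blk := by
  cases bs with
  | nil => exact absurd rfl h
  | cons b bs => simp [pvJoinS]

lemma pvB_inv (bp : String) (ps : List String) :
    ∀ (blocks : List (List String)) (run : List String), (blocks ≠ [] ∨ run ≠ []) →
      pvJoinS (pvFlush (ps.foldl (pvStepB bp) (blocks, run))) =
        pvJoinS (pvFlush (blocks, run)) ++ pvCore bp (!run.isEmpty) ps := by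
  induction ps with
  | nil => intro blocks run _; simp [pvCore]
  | cons p ps ih =>
      intro blocks run h
      simp only [List.foldl_cons]
      cases hb : PySem.Chars.startswith p.toList bp.toList with
      | true =>
          have hb' : PySem.Str.startswith p bp = true := by rw [PySem.Str.startswith_eq]; exact hb
          have hstep : pvStepB bp (blocks, run) p = (blocks, run ++ [p]) := by
            simp only [pvStepB]; rw [if_pos hb']
          rw [hstep, ih blocks (run ++ [p]) (Or.inr (by simp))]
          have hflushr : pvFlush (blocks, run ++ [p]) = blocks ++ [run ++ [p]] := by
            simp only [pvFlush]; rw [if_pos (by simp)]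
          cases hr : run.isEmpty with
          | true =>
              have hrn : run = [] := List.isEmpty_iff.mp hr
              subst hrn
              rcases h with h | h
              · have hflush : pvFlush (blocks, ([] : List String)) = blocks := by
                  simp only [pvFlush]; rw [if_neg (by simp)]
                rw [hflushr, hflush]
                simp only [List.nil_append]
                rw [pvJoinS_block blocks [p] h]
                simp [pvCore, hb]
              · exact absurd rfl h
          | false =>
              have hrn : run ≠ [] := by simpa using List.isEmpty_eq_false_iff.mp hr
              have hflush : pvFlush (blocks, run) = blocks ++ [run] := by
                simp only [pvFlush]; rw [if_pos hrn]
              rw [hflushr, hflush, pvJoinS_last blocks run p]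
              have he : (run ++ [p]).isEmpty = false := by cases run <;> simp
              simp [pvCore, hb, he]
      | false =>
          have hb' : PySem.Str.startswith p bp = false := by rw [PySem.Str.startswith_eq]; exact hb
          have hstep : pvStepB bp (blocks, run) p = (pvFlush (blocks, run) ++ [[p]], []) := by
            by_cases hrn : run = []
            · simp only [pvStepB, pvFlush]
              rw [if_neg (by simp [hb]), if_neg (by simp [hrn]), if_neg (by simp [hrn])]
            · simp only [pvStepB, pvFlush]
              rw [if_neg (by simp [hb]), if_pos hrn, if_pos hrn]
          rw [hstep, ih _ [] (Or.inl (by simp))]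
          have hf : pvFlush (blocks, run) ≠ [] := by
            by_cases hrn : run = []
            · rcases h with h | h
              · simp only [pvFlush]; rw [if_neg (by simp [hrn])]; exact h
              · exact absurd hrn h
            · simp only [pvFlush]; rw [if_pos hrn]; simp
          have hflush2 : pvFlush (pvFlush (blocks, run) ++ [[p]], ([] : List String)) =
              pvFlush (blocks, run) ++ [[p]] := by
            simp only [pvFlush]; rw [if_neg (by simp)]
          rw [hflush2, pvJoinS_block _ [p] hf]
          simp [pvCore, hb]

-- ===== VERDICT (by name: the statement is the Claim_ definition above) =====
theorem to_pretty_xml__space_blocks_py_spec : Claim_equal_to_pretty_xml__space_blocks_py := by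
  intro paras indent _
  unfold Spec_to_pretty_xml__space_blocks_py
  unfold to_pretty_xml__space_blocks_py to_pretty_xml__space_blocks_py_alt
  rw [pvJoin_top]
  cases paras with
  | nil =>
      simp only [PySem.List.enumerate_nil, List.foldl_nil]
      simp only [pvFlush]
      rw [if_neg (by simp)]
      rfl
  | cons p ps =>
      set bp := String.mk (PySem.List.pyRepeat [' '] indent ++ ['*']) with hbp
      rw [PySem.List.enumerate_cons]
      simp only [List.foldl_cons]
      have h0 : pvStepA bp ([], false) (0, p) = ([p], PySem.Str.startswith p bp) := by
        simp [pvStepA]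
      rw [h0, pvA_loop bp ps (0 + 1) [p] _ (by omega)]
      cases hb : PySem.Chars.startswith p.toList bp.toList with
      | true =>
          have hb' : PySem.Str.startswith p bp = true := by rw [PySem.Str.startswith_eq]; exact hb
          have hstep : pvStepB bp ([], []) p = ([], [p]) := by
            simp only [pvStepB]; rw [if_pos hb']; simp
          rw [hstep, pvB_inv bp ps [] [p] (Or.inr (by simp))]
          have hflush : pvFlush (([] : List (List String)), [p]) = [[p]] := by
            simp only [pvFlush]; rw [if_pos (by simp)]; simp
          rw [hflush]
          simp [pvJoinS, hb]
      | false =>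
          have hb' : PySem.Str.startswith p bp = false := by rw [PySem.Str.startswith_eq]; exact hb
          have hstep : pvStepB bp ([], []) p = ([[p]], []) := by
            simp only [pvStepB]
            rw [if_neg (by simp [hb]), if_neg (by simp)]
            simp
          rw [hstep, pvB_inv bp ps [[p]] [] (Or.inl (by simp))]
          have hflush : pvFlush ([[p]], ([] : List String)) = [[p]] := by
            simp only [pvFlush]; rw [if_neg (by simp)]
          rw [hflush]
          simp [pvJoinS, hb]
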